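-- pv_equiv track=rewrite | github.com/g-hurst/adventOfCode2022 | day3/day3.py | part_2
-- ===== SOURCE A (Python) =====
-- from collections import Counter
--
-- def part_2(data):
--     sub_groups = []
--     curr = []
--     while len(data):
--         curr.append(data.pop(0))
--         if len(curr) == 3:
--             sub_groups.append(curr)
--             curr = []
--
--     conv = lambda x: set(list(x))
--     badges = [conv(group[0]).intersection(conv(group[1])).intersection(conv(group[2])) for group in sub_groups]
--     badges = Counter([item for sublist in badges for item in sublist])
--
--     total = 0
--     for letter in badges.keys():
--         weight = (ord(letter) - ord('a') + 1) if letter.islower() else (ord(letter) - ord('A') + 27)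
--         total += badges[letter] * weight
--     return total
-- ===== SOURCE B (Python) =====
-- def part_2(data):
--     # Mutates data like A: the list is emptied.
--     total = 0
--     while len(data) >= 3:
--         counts = {}
--         for _ in range(3):
--             for ch in set(data.pop(0)):
--                 counts[ch] = counts.get(ch, 0) + 1
--         for ch, c in counts.items():
--             if c == 3:
--                 total += ord(ch) - 96 if ch.islower() else ord(ch) - 38
--     data.clear()
--     return total
-- ===== Notes on version B (the rewrite author's own statement) =====
-- stated objective: alternative
-- what changed: Replaced per-group set intersections plus a global Counter over flattened badges with a per-group occurrence count of each line's distinct characters: a character is a badge exactly when its count reaches 3, and its priority is added to a single running total inside the group loop.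
import Mathlib
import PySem

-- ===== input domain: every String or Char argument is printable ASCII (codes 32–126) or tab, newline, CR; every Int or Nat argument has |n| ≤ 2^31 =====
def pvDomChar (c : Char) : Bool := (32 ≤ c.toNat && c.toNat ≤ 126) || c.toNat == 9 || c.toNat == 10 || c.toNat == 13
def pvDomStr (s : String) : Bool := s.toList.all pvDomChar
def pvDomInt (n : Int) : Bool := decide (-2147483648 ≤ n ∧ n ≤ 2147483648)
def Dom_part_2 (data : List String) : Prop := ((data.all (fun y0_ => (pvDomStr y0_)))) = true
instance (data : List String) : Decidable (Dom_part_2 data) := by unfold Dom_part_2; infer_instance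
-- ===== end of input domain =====

-- B replaces A's set-intersection + Counter-over-flattened-badges pipeline by a per-group occurrence
-- count of each line's distinct characters (a character is a badge iff its count is 3), accumulating
-- priorities in one running total (alternative algorithm). Both Pythons empty the `data` list in
-- place; the equivalence proved here is about the return value.

-- ===== PORT A =====
-- while len(data): curr.append(data.pop(0)); if len(curr) == 3: sub_groups.append(curr); curr = []
def pvGroupLoop : List String → List String → List (List String) → List (List String)
  | [], _curr, subs => subs
  | x :: rest, curr, subs =>
      let curr' := curr ++ [x]
      if curr'.length = 3 then pvGroupLoop rest [] (subs ++ [curr'])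
      else pvGroupLoop rest curr' subs

-- conv(group[0]).intersection(conv(group[1])).intersection(conv(group[2]));
-- every group the loop builds has exactly 3 elements, so the fallback branch is unreachable
-- (in Python, group[2] on a shorter list would be an IndexError, which never happens).
def pvBadge (group : List String) : PySem.Set Char :=
  match group with
  | g0 :: g1 :: g2 :: _ =>
      PySem.Set.inter (PySem.Set.inter (PySem.Set.ofList g0.toList) (PySem.Set.ofList g1.toList))
        (PySem.Set.ofList g2.toList)
  | _ => PySem.Set.empty

def part_2 (data : List String) : Int :=
  let sub_groups := pvGroupLoop data [] []
  let flat := (sub_groups.map pvBadge).flatMap (fun s => s)  -- [item for sublist in badges for item in sublist]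
  let badges := PySem.Dict.counter flat
  badges.keys.foldl (fun total letter =>
    let weight : Int := if PySem.Chars.islower letter then (letter.toNat : Int) - 97 + 1
                        else (letter.toNat : Int) - 65 + 27
    total + badges.getD letter 0 * weight) 0

-- ===== PORT B =====
-- total += ord(ch) - 96 if ch.islower() else ord(ch) - 38
def pvWB (ch : Char) : Int :=
  if PySem.Chars.islower ch then (ch.toNat : Int) - 96 else (ch.toNat : Int) - 38

-- while len(data) >= 3: counts = {}; for each of the 3 popped lines: for ch in set(line):
-- counts[ch] = counts.get(ch, 0) + 1; then for ch, c in counts.items(): if c == 3: total += weight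
def pvBLoop : List String → Int → Int
  | a :: b :: c :: rest, total =>
      let d0 := (PySem.Set.ofList a.toList : List Char).foldl
        (fun d ch => d.insert ch (d.getD ch 0 + 1)) (PySem.Dict.empty : PySem.Dict Char Int)
      let d1 := (PySem.Set.ofList b.toList : List Char).foldl
        (fun d ch => d.insert ch (d.getD ch 0 + 1)) d0
      let d2 := (PySem.Set.ofList c.toList : List Char).foldl
        (fun d ch => d.insert ch (d.getD ch 0 + 1)) d1
      pvBLoop rest (d2.items.foldl (fun t kv => if kv.2 = 3 then t + pvWB kv.1 else t) total)
  | _, total => total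

def part_2_alt (data : List String) : Int := pvBLoop data 0

-- ===== PRECONDITION & SPEC =====
def Spec_part_2 (data : List String) (out : Int) : Prop := out = part_2_alt data
instance (data : List String) (out : Int) : Decidable (Spec_part_2 data out) := by unfold Spec_part_2; infer_instance

-- ===== CLAIM =====
def Claim_equal_part_2 : Prop := ∀ (data : List String), Dom_part_2 data → Spec_part_2 data (part_2 data)

-- ===== LEMMAS AND PROOFS =====

-- the 3-line groups both programs traverse, in order
def pvChunks3 : List String → List (List String)
  | a :: b :: c :: rest => [a, b, c] :: pvChunks3 rest
  | _ => []

-- the priority A assigns to a letter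
def pvW (ch : Char) : Int :=
  if PySem.Chars.islower ch then (ch.toNat : Int) - 97 + 1 else (ch.toNat : Int) - 65 + 27

lemma pvWB_eq_pvW (ch : Char) : pvWB ch = pvW ch := by
  unfold pvWB pvW; split_ifs <;> ring

-- A's grouping loop produces exactly the chunks of three (a trailing partial group is dropped)
lemma group_loop_spec (data : List String) :
    ∀ subs, pvGroupLoop data [] subs = subs ++ pvChunks3 data := by
  induction data using pvChunks3.induct with
  | case1 a b c rest ih =>
      intro subs
      simp [pvGroupLoop, pvChunks3, ih]
  | case2 d h =>
      intro subs
      match d, h with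
      | [], _ => simp [pvGroupLoop, pvChunks3]
      | [x], _ => simp [pvGroupLoop, pvChunks3]
      | [x, y], _ => simp [pvGroupLoop, pvChunks3]
      | x :: y :: z :: r, h => exact (h x y z r rfl).elim

-- A's Counter-and-weights loop is the plain weight sum over the flattened badge list
lemma counter_fold_sum (l : List Char) :
    (PySem.Dict.counter l).keys.foldl (fun total letter =>
      total + (PySem.Dict.counter l).getD letter 0 * pvW letter) 0 = (l.map pvW).sum := by
  rw [PySem.List.foldl_add _ (fun letter => (PySem.Dict.counter l).getD letter 0 * pvW letter) 0]
  simp only [PySem.Dict.getD_counter, PySem.Dict.keys_counter, zero_add]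
  have hnd : (PySem.Set.ofList l).Nodup := PySem.Set.nodup_ofList l
  have hfin : (PySem.Set.ofList l).toFinset = l.toFinset := by
    ext x; simp [PySem.Set.mem_ofList]
  rw [← List.sum_toFinset _ hnd, hfin, Finset.sum_list_map_count l pvW]
  exact Finset.sum_congr rfl (fun k _ => (nsmul_eq_mul _ _).symm)

lemma foldl_if_add {α : Type} (l : List α) (p : α → Prop) [DecidablePred p] (g : α → Int) :
    ∀ t : Int, l.foldl (fun t x => if p x then t + g x else t) t
      = t + ((l.filter (fun x => decide (p x))).map g).sum := by
  induction l with
  | nil => simp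
  | cons x xs ih =>
      intro t
      by_cases h : p x <;> simp [h, ih, add_assoc]

-- B's per-group counting pass equals the weight sum over that group's badge set
lemma group_count_sum (a b c : String) :
    ∀ t : Int,
      (((PySem.Set.ofList b.toList ++ PySem.Set.ofList c.toList : List Char).foldl
        (fun d ch => d.insert ch (d.getD ch 0 + 1))
        ((PySem.Set.ofList a.toList : List Char).foldl
          (fun d ch => d.insert ch (d.getD ch 0 + 1)) (PySem.Dict.empty : PySem.Dict Char Int))).items).foldl
        (fun t kv => if kv.2 = 3 then t + pvWB kv.1 else t) t
      = t + ((pvBadge [a, b, c] : List Char).map pvW).sum := by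
  intro t
  set sa := (PySem.Set.ofList a.toList : List Char) with hsa
  set sb := (PySem.Set.ofList b.toList : List Char) with hsb
  set sc := (PySem.Set.ofList c.toList : List Char) with hsc
  set L := sa ++ sb ++ sc with hL
  have hd : (sb ++ sc).foldl (fun d ch => d.insert ch (d.getD ch 0 + 1))
        (sa.foldl (fun d ch => d.insert ch (d.getD ch 0 + 1)) (PySem.Dict.empty : PySem.Dict Char Int))
      = PySem.Dict.counter L := by
    rw [← List.foldl_append, ← PySem.Dict.foldl_insert_getD_add_one_eq_counter, hL,
      List.append_assoc]
  rw [hd, PySem.Dict.items_counter, List.foldl_map, foldl_if_add _ (fun k => (L.count k : Int) = 3)]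
  congr 1
  have hcnt : ∀ (s : List Char) (k : Char), s.Nodup → s.count k = if k ∈ s then 1 else 0 := by
    intro s k hnd
    split_ifs with h
    · exact List.count_eq_one_of_mem hnd h
    · exact List.count_eq_zero_of_not_mem h
  have hmemL : ∀ k : Char, (L.count k : Int) = 3 ↔ (k ∈ sa ∧ k ∈ sb ∧ k ∈ sc) := by
    intro k
    rw [hL, List.count_append, List.count_append,
      hcnt sa k (by rw [hsa]; exact PySem.Set.nodup_ofList _),
      hcnt sb k (by rw [hsb]; exact PySem.Set.nodup_ofList _),
      hcnt sc k (by rw [hsc]; exact PySem.Set.nodup_ofList _)]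
    split_ifs <;> simp_all
  set badge := (pvBadge [a, b, c] : List Char) with hbd
  have hmem : ∀ ch, ch ∈ badge ↔ (ch ∈ a.toList ∧ ch ∈ b.toList ∧ ch ∈ c.toList) := by
    intro ch
    simp [hbd, pvBadge, PySem.Set.mem_inter, PySem.Set.mem_ofList, and_assoc]
  have hnd : badge.Nodup := by
    apply PySem.Set.nodup_inter
    apply PySem.Set.nodup_inter
    exact PySem.Set.nodup_ofList _
  have hperm : ((PySem.Set.ofList L : List Char).filter
      (fun k => decide ((L.count k : Int) = 3))).Perm badge := by
    apply (List.perm_ext_iff_of_nodup ((PySem.Set.nodup_ofList L).filter _) hnd).mpr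
    intro k
    rw [List.mem_filter, PySem.Set.mem_ofList, decide_eq_true_eq, hmemL k, hmem k]
    simp only [hsa, hsb, hsc, PySem.Set.mem_ofList, hL, List.mem_append]
    tauto
  calc ((List.filter (fun k => decide ((L.count k : Int) = 3)) (PySem.Set.ofList L : List Char)).map
          (fun k => pvWB (k, (L.count k : Int)).1)).sum
      = ((List.filter (fun k => decide ((L.count k : Int) = 3)) (PySem.Set.ofList L : List Char)).map
          pvW).sum := by
        congr 1
        exact List.map_congr_left (fun k _ => pvWB_eq_pvW k)
    _ = (badge.map pvW).sum := (hperm.map pvW).sum_eq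

-- B's whole loop computes the weight sum over the flattened badge lists of the chunks
lemma alt_loop_spec (data : List String) :
    ∀ t : Int, pvBLoop data t
      = t + ((((pvChunks3 data).map pvBadge).flatMap (fun s => s)).map pvW).sum := by
  induction data using pvChunks3.induct with
  | case1 a b c rest ih =>
      intro t
      show pvBLoop rest _ = _
      rw [ih, ← List.foldl_append, group_count_sum]
      simp [pvChunks3, add_assoc]
  | case2 d h =>
      intro t
      match d, h with
      | [], _ => simp [pvBLoop, pvChunks3]
      | [x], _ => simp [pvBLoop, pvChunks3]
      | [x, y], _ => simp [pvBLoop, pvChunks3]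
      | x :: y :: z :: r, h => exact (h x y z r rfl).elim

-- ===== VERDICT =====
theorem part_2_spec : Claim_equal_part_2 := by
  intro data hdom
  show part_2 data = part_2_alt data
  have hA : part_2 data
      = ((((pvChunks3 data).map pvBadge).flatMap (fun s => s)).map pvW).sum := by
    show (PySem.Dict.counter (((pvGroupLoop data [] []).map pvBadge).flatMap (fun s => s))).keys.foldl
        (fun total letter =>
          total + (PySem.Dict.counter (((pvGroupLoop data [] []).map pvBadge).flatMap (fun s => s))).getD
            letter 0 * pvW letter) 0 = _
    rw [group_loop_spec data [], List.nil_append, counter_fold_sum]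
  rw [hA, show part_2_alt data = pvBLoop data 0 from rfl, alt_loop_spec data 0, zero_add]
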